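-- pv_equiv track=rewrite | github.com/ccctw-ma/leetcode | src/Medium/DynamicTest/minimizeTheDifference.py | minimizeTheDifference2
-- ===== SOURCE A (Python) =====
-- from typing import List, Tuple, Union, Optional
--
-- def minimizeTheDifference2(mat: List[List[int]], target: int) -> int:
--     m, n = len(mat), len(mat[0])
--     cur = 1  ## 初始状态只有一个和：0
--     for i in range(m):
--         tmp = 0
--         for j in range(n):
--             tmp |= cur << mat[i][j]  ## 左移n位，代表所有和都加n
--         cur = tmp
--     res = 0
--     left = right = 1 << target
--     while True:
--         if cur & left or cur & right:
--             return res
--         else: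
--             left <<= 1
--             right >>= 1
--             res += 1
-- ===== SOURCE B (Python) =====
-- def minimizeTheDifference2(mat, target):
--     n = len(mat[0])
--
--     def sums(lo, hi):
--         # set of sums obtainable by picking one of the first n values of each row lo..hi-1
--         if hi - lo == 1:
--             return {mat[lo][j] for j in range(n)}
--         mid = (lo + hi) // 2
--         return {a + b for a in sums(lo, mid) for b in sums(mid, hi)}
--
--     return min(abs(s - target) for s in sums(0, len(mat)))
-- ===== Notes on version B (the rewrite author's own statement) =====
-- stated objective: alternative
-- what changed: Replaces A's linear layer-by-layer shift-OR bitmask DP plus outward left/right bit-scan with a divide-and-conquer recursion: the matrix is split in half, each half's reachable-sum set is computed recursively (base case: the set of one row's values), the two halves are combined by pairwise addition, and the answer is a direct min of |s - target| over the final set.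
import Mathlib
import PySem

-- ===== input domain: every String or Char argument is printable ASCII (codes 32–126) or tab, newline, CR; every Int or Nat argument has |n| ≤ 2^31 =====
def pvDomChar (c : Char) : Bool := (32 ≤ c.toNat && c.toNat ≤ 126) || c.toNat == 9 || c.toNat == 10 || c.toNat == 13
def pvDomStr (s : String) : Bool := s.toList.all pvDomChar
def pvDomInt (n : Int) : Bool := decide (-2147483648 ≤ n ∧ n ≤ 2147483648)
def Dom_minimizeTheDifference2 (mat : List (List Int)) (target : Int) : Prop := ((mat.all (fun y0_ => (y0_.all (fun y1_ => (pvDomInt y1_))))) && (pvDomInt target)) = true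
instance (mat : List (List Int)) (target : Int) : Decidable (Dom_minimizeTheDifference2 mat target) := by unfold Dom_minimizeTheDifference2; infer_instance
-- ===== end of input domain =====

-- B replaces A's linear shift-OR bitmask DP and outward left/right bit-scan with a
-- divide-and-conquer recursion (split the rows in half, combine the two halves'
-- reachable-sum sets by pairwise addition) and a direct min of |s - target|
-- (objective: alternative).

-- ===== PORT A =====
-- inner loop: `for j in range(n): tmp |= cur << mat[i][j]`
-- (index j in range and mat[i][j] ≥ 0 under Pre_, so pyGetD / .toNat are exact there)
def minimizeTheDifference2_row (cur : Nat) (row : List Int) (n : Nat) : Nat :=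
  (List.range n).foldl (fun (tmp : Nat) (j : Nat) => tmp ||| (cur <<< (PySem.List.pyGetD row (j : Int) 0).toNat)) 0

-- `while True: if cur & left or cur & right: return res; else: left <<= 1; right >>= 1; res += 1`
-- fuel only makes the while-loop total; under Pre_ it is never exhausted (proved below)
def minimizeTheDifference2_scan (cur : Nat) (fuel res left right : Nat) : Nat :=
  match fuel with
  | 0 => 0
  | fuel' + 1 =>
    if cur &&& left ≠ 0 ∨ cur &&& right ≠ 0 then res
    else minimizeTheDifference2_scan cur fuel' (res + 1) (left <<< 1) (right >>> 1)

def minimizeTheDifference2 (mat : List (List Int)) (target : Int) : Int :=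
  let n := (mat.headD []).length        -- n = len(mat[0]); mat nonempty under Pre_
  let cur := mat.foldl (fun cur row => minimizeTheDifference2_row cur row n) 1
  let t := target.toNat                 -- `1 << target` needs target ≥ 0 (Pre_); exact there
  (minimizeTheDifference2_scan cur (cur + t + 1) 0 (1 <<< t) (1 <<< t) : Int)

-- ===== PORT B =====
-- `sums(lo, hi)`: if hi - lo == 1 return {mat[lo][j] for j in range(n)};
-- mid = (lo+hi)//2; return {a + b for a in sums(lo, mid) for b in sums(mid, hi)}.
-- The guard is `hi - lo ≤ 1` only to make the recursion total; hi - lo = 0 never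
-- occurs on any call reachable under Pre_ (sums is first called with lo = 0 < hi).
def pvSumsB (mat : List (List Int)) (n lo hi : Nat) : List Int :=
  if hi - lo ≤ 1 then
    PySem.Set.ofList ((List.range n).map (fun (j : Nat) =>
      PySem.List.pyGetD (PySem.List.pyGetD mat (lo : Int) []) (j : Int) 0))
  else
    let mid := (lo + hi) / 2
    PySem.Set.ofList ((pvSumsB mat n lo mid).flatMap (fun a =>
      (pvSumsB mat n mid hi).map (fun b => a + b)))
termination_by hi - lo
decreasing_by all_goals simp_all; omega

def minimizeTheDifference2_alt (mat : List (List Int)) (target : Int) : Int :=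
  let n := (mat.headD []).length      -- n = len(mat[0]); mat nonempty under Pre_
  -- min over a nonempty generator under Pre_ (min of the values: order-independent)
  (PySem.List.min? ((pvSumsB mat n 0 mat.length).map (fun s => |s - target|)) (fun x => x)).getD 0

-- ===== PRECONDITION & SPEC =====
-- Pre_ = exactly where A returns: a nonempty matrix with a nonempty first row of length
-- n, every row at least n long with nonnegative entries in its first n columns, and
-- target ≥ 0; outside it A raises (IndexError on empty mat / rows shorter than the
-- first, ValueError on a negative shift amount or negative target) or loops forever
-- (empty first row).
def Pre_minimizeTheDifference2 (mat : List (List Int)) (target : Int) : Prop :=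
  mat ≠ [] ∧ (mat.headD []) ≠ [] ∧ 0 ≤ target ∧
  ∀ row ∈ mat, (mat.headD []).length ≤ row.length ∧
    ∀ j < (mat.headD []).length, 0 ≤ row.getD j 0
instance (mat : List (List Int)) (target : Int) : Decidable (Pre_minimizeTheDifference2 mat target) := by
  unfold Pre_minimizeTheDifference2; infer_instance

def pvWitness_minimizeTheDifference2 : List (List Int) × Int := ([[1, 2], [3, 4]], 6)

def Spec_minimizeTheDifference2 (mat : List (List Int)) (target : Int) (out : Int) : Prop := out = minimizeTheDifference2_alt mat target
instance (mat : List (List Int)) (target : Int) (out : Int) : Decidable (Spec_minimizeTheDifference2 mat target out) := by unfold Spec_minimizeTheDifference2; infer_instance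

-- ===== CLAIM (what is proved, stated in full; the proofs are below) =====
def Claim_equal_minimizeTheDifference2 : Prop := ∀ (mat : List (List Int)) (target : Int), Dom_minimizeTheDifference2 mat target → Pre_minimizeTheDifference2 mat target → Spec_minimizeTheDifference2 mat target (minimizeTheDifference2 mat target)

-- ===== LEMMAS AND PROOFS =====

-- proof-side helper: the layer-by-layer reachable-sum set (used to characterise BOTH
-- A's bitmask fold and B's divide-and-conquer recursion)
def pvStep (n : Nat) (acc row : List Int) : List Int :=
  PySem.Set.ofList (acc.flatMap
    (fun s => (List.range n).map (fun (j : Nat) => s + PySem.List.pyGetD row (j : Int) 0)))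

def pvReach (n : Nat) (acc : List Int) (rows : List (List Int)) : List Int :=
  rows.foldl (pvStep n) acc

theorem pv_mem_step (n : Nat) (acc row : List Int) (x : Int) :
    x ∈ pvStep n acc row ↔ ∃ a ∈ acc, ∃ j < n, x = a + PySem.List.pyGetD row (j : Int) 0 := by
  unfold pvStep
  simp only [PySem.Set.mem_ofList, List.mem_flatMap, List.mem_map, List.mem_range]
  constructor
  · rintro ⟨a, ha, j, hj, rfl⟩; exact ⟨a, ha, j, hj, rfl⟩
  · rintro ⟨a, ha, j, hj, rfl⟩; exact ⟨a, ha, j, hj, rfl⟩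

-- the guard of A's scan at step r (there left = 1 <<< (t+r) and right = (1 <<< t) >>> r)
def pvHit (cur t r : Nat) : Prop :=
  cur &&& (1 <<< (t + r)) ≠ 0 ∨ cur &&& ((1 <<< t) >>> r) ≠ 0

theorem pv_and_pow (cur k : Nat) : cur &&& (1 <<< k) ≠ 0 ↔ cur.testBit k := by
  rw [Nat.one_shiftLeft, Nat.and_two_pow]
  cases h : cur.testBit k <;> simp

theorem pvHit_iff (cur t r : Nat) :
    pvHit cur t r ↔ cur.testBit (t + r) ∨ (r ≤ t ∧ cur.testBit (t - r)) := by
  unfold pvHit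
  rw [pv_and_pow]
  by_cases h : r ≤ t
  · rw [show (1 <<< t) >>> r = 1 <<< (t - r) by
      rw [Nat.one_shiftLeft, Nat.one_shiftLeft, Nat.shiftRight_eq_div_pow,
        Nat.pow_div h (by norm_num)], pv_and_pow]
    tauto
  · rw [show (1 <<< t) >>> r = 0 by
      rw [Nat.one_shiftLeft, Nat.shiftRight_eq_div_pow]
      exact Nat.div_eq_of_lt (Nat.pow_lt_pow_right one_lt_two (by omega))]
    simp [h]

theorem pv_testBit_foldl_or {α : Type} (l : List α) (f : α → Nat) (a k : Nat) :
    (l.foldl (fun tmp j => tmp ||| f j) a).testBit k ↔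
      a.testBit k ∨ ∃ j ∈ l, (f j).testBit k := by
  induction l generalizing a with
  | nil => simp
  | cons x xs ih =>
    simp only [List.foldl_cons, ih, Nat.testBit_or, List.mem_cons, Bool.or_eq_true]
    constructor
    · rintro (⟨h | h⟩ | ⟨j, hj, h⟩)
      · exact Or.inl h
      · exact Or.inr ⟨x, Or.inl rfl, h⟩
      · exact Or.inr ⟨j, Or.inr hj, h⟩
    · rintro (h | ⟨j, (rfl | hj), h⟩)
      · exact Or.inl (Or.inl h)
      · exact Or.inl (Or.inr h)
      · exact Or.inr ⟨j, hj, h⟩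

-- one row step preserves the bitmask ↔ reachable-set correspondence
theorem pv_row_step (cur : Nat) (acc : List Int) (row : List Int) (n : Nat)
    (hn0 : 0 < n) (_hlen : n ≤ row.length) (hnn : ∀ j < n, 0 ≤ row.getD j 0)
    (haccnn : ∀ s ∈ acc, 0 ≤ s) (hne : acc ≠ [])
    (hinv : ∀ k : Nat, cur.testBit k ↔ (k : Int) ∈ acc) :
    (∀ k : Nat, (minimizeTheDifference2_row cur row n).testBit k ↔
        (k : Int) ∈ pvStep n acc row) ∧
    (∀ s ∈ pvStep n acc row, 0 ≤ s) ∧ pvStep n acc row ≠ [] := by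
  have hgnn : ∀ j < n, 0 ≤ PySem.List.pyGetD row (j : Int) 0 := by
    intro j hj
    rw [PySem.List.pyGetD_natCast]
    exact hnn j hj
  refine ⟨?_, ?_, ?_⟩
  · intro k
    unfold minimizeTheDifference2_row
    rw [pv_testBit_foldl_or, pv_mem_step]
    simp only [List.mem_range, Nat.zero_testBit, Bool.false_eq_true, false_or]
    constructor
    · rintro ⟨j, hj, hbit⟩
      rw [Nat.testBit_shiftLeft, Bool.and_eq_true, decide_eq_true_eq] at hbit
      obtain ⟨hle, hbit⟩ := hbit
      have hv : 0 ≤ PySem.List.pyGetD row (j : Int) 0 := hgnn j hj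
      refine ⟨((k - (PySem.List.pyGetD row (j : Int) 0).toNat : Nat) : Int),
        (hinv _).mp hbit, j, hj, ?_⟩
      omega
    · rintro ⟨s, hs, j, hj, hk⟩
      refine ⟨j, hj, ?_⟩
      rw [Nat.testBit_shiftLeft, Bool.and_eq_true, decide_eq_true_eq]
      have hsnn : 0 ≤ s := haccnn _ hs
      have hv : 0 ≤ PySem.List.pyGetD row (j : Int) 0 := hgnn j hj
      have hbit : cur.testBit s.toNat := (hinv _).mpr (by rwa [Int.toNat_of_nonneg hsnn])
      refine ⟨by omega, ?_⟩
      rw [show k - (PySem.List.pyGetD row (j : Int) 0).toNat = s.toNat by omega]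
      exact hbit
  · intro s hs
    rw [pv_mem_step] at hs
    obtain ⟨a, ha, j, hj, rfl⟩ := hs
    have := haccnn _ ha; have := hgnn j hj; omega
  · obtain ⟨s, hs⟩ := List.exists_mem_of_ne_nil acc hne
    intro h
    have : (s + PySem.List.pyGetD row ((0 : Nat) : Int) 0) ∈ pvStep n acc row := by
      rw [pv_mem_step]
      exact ⟨s, hs, 0, hn0, rfl⟩
    rw [h] at this; exact (List.not_mem_nil) this

-- the correspondence carried through the whole fold over the rows
theorem pv_fold_inv (mat : List (List Int)) (n : Nat)
    (hrows : ∀ row ∈ mat, n ≤ row.length ∧ ∀ j < n, 0 ≤ row.getD j 0) (hn : 0 < n) :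
    ∀ (cur : Nat) (acc : List Int),
      (∀ k : Nat, cur.testBit k ↔ (k : Int) ∈ acc) → (∀ s ∈ acc, 0 ≤ s) → acc ≠ [] →
      (∀ k : Nat, (mat.foldl (fun cur row => minimizeTheDifference2_row cur row n) cur).testBit k ↔
          (k : Int) ∈ pvReach n acc mat) ∧
      (∀ s ∈ pvReach n acc mat, 0 ≤ s) ∧ pvReach n acc mat ≠ [] := by
  induction mat with
  | nil => intro cur acc h1 h2 h3; exact ⟨h1, h2, h3⟩
  | cons row rest ih =>
    intro cur acc h1 h2 h3
    obtain ⟨hlen, hnn⟩ := hrows row (List.mem_cons_self)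
    have step := pv_row_step cur acc row n hn hlen hnn h2 h3 h1
    simp only [pvReach, List.foldl_cons]
    exact ih (fun r hr => hrows r (List.mem_cons_of_mem _ hr)) _ _ step.1 step.2.1 step.2.2

-- membership in a fold from an arbitrary accumulator decomposes as acc-element + sum
theorem pv_mem_reach (n : Nat) (rows : List (List Int)) :
    ∀ (acc : List Int) (x : Int),
      x ∈ pvReach n acc rows ↔ ∃ a ∈ acc, ∃ p ∈ pvReach n [(0 : Int)] rows, x = a + p := by
  induction rows with
  | nil =>
    intro acc x
    simp [pvReach]
  | cons row rest ih =>
    intro acc x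
    simp only [pvReach, List.foldl_cons]
    rw [show rest.foldl (pvStep n) (pvStep n acc row) = pvReach n (pvStep n acc row) rest from rfl,
      show rest.foldl (pvStep n) (pvStep n [(0:Int)] row) = pvReach n (pvStep n [(0:Int)] row) rest from rfl,
      ih]
    constructor
    · rintro ⟨b, hb, p, hp, rfl⟩
      rw [pv_mem_step] at hb
      obtain ⟨a, ha, j, hj, rfl⟩ := hb
      refine ⟨a, ha, PySem.List.pyGetD row (j : Int) 0 + p, ?_, by ring⟩
      exact (ih _ _).mpr ⟨0 + PySem.List.pyGetD row (j : Int) 0,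
        (pv_mem_step n _ row _).mpr ⟨0, by simp, j, hj, rfl⟩, p, hp, by ring⟩
    · rintro ⟨a, ha, q, hq, rfl⟩
      obtain ⟨c, hc, p, hp, rfl⟩ := (ih _ _).mp hq
      rw [pv_mem_step] at hc
      obtain ⟨z, hz, j, hj, rfl⟩ := hc
      simp only [List.mem_singleton] at hz
      subst hz
      refine ⟨a + PySem.List.pyGetD row (j : Int) 0,
        (pv_mem_step n acc row _).mpr ⟨a, ha, j, hj, rfl⟩, p, hp, by ring⟩

-- B's divide-and-conquer set has the same members as the layer fold over the same rows
theorem pv_mem_sumsB (mat : List (List Int)) (n : Nat) :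
    ∀ (d lo hi : Nat), hi - lo = d → lo < hi → hi ≤ mat.length →
      ∀ x : Int, (x ∈ pvSumsB mat n lo hi ↔ x ∈ pvReach n [(0 : Int)] ((mat.drop lo).take (hi - lo))) := by
  intro d
  induction d using Nat.strong_induction_on with
  | _ d ih =>
    intro lo hi hd hlt hhi x
    by_cases hbase : hi - lo ≤ 1
    · have hhi1 : hi = lo + 1 := by omega
      rw [pvSumsB, if_pos hbase]
      subst hhi1
      have hlo : lo < mat.length := by omega
      rw [show lo + 1 - lo = 1 by omega,
        List.drop_eq_getElem_cons hlo, List.take_succ_cons, List.take_zero]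
      have hrow : PySem.List.pyGetD mat (lo : Int) [] = mat[lo] := by
        rw [PySem.List.pyGetD_natCast, List.getD_eq_getElem mat [] hlo]
      simp only [pvReach, List.foldl_cons, List.foldl_nil, PySem.Set.mem_ofList,
        List.mem_map, List.mem_range, hrow, pv_mem_step, List.mem_singleton]
      constructor
      · rintro ⟨j, hj, rfl⟩; exact ⟨0, rfl, j, hj, by ring⟩
      · rintro ⟨a, rfl, j, hj, rfl⟩; exact ⟨j, hj, by ring⟩
    · rw [pvSumsB, if_neg hbase]
      have hmid1 : lo < (lo + hi) / 2 := by omega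
      have hmid2 : (lo + hi) / 2 < hi := by omega
      simp only [PySem.Set.mem_ofList, List.mem_flatMap, List.mem_map]
      have h1 := ih ((lo + hi) / 2 - lo) (by omega) lo ((lo + hi) / 2) rfl hmid1 (by omega)
      have h2 := ih (hi - (lo + hi) / 2) (by omega) ((lo + hi) / 2) hi rfl hmid2 hhi
      have hsplit : (mat.drop lo).take (hi - lo)
          = (mat.drop lo).take ((lo + hi) / 2 - lo)
            ++ (mat.drop ((lo + hi) / 2)).take (hi - (lo + hi) / 2) := by
        rw [show hi - lo = ((lo + hi) / 2 - lo) + (hi - (lo + hi) / 2) by omega,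
          List.take_add, List.drop_drop,
          show lo + ((lo + hi) / 2 - lo) = (lo + hi) / 2 by omega]
      rw [hsplit]
      have happ : pvReach n [(0:Int)]
          ((mat.drop lo).take ((lo + hi) / 2 - lo) ++ (mat.drop ((lo + hi) / 2)).take (hi - (lo + hi) / 2))
          = pvReach n (pvReach n [(0:Int)] ((mat.drop lo).take ((lo + hi) / 2 - lo)))
              ((mat.drop ((lo + hi) / 2)).take (hi - (lo + hi) / 2)) := by
        simp [pvReach, List.foldl_append]
      rw [happ, pv_mem_reach]
      constructor
      · rintro ⟨a, ha, b, hb, rfl⟩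
        exact ⟨a, (h1 a).mp ha, b, (h2 b).mp hb, rfl⟩
      · rintro ⟨a, ha, b, hb, rfl⟩
        exact ⟨a, (h1 a).mpr ha, b, (h2 b).mpr hb, rfl⟩

-- the scan returns the least r with pvHit, given enough fuel
theorem pv_scan_eq (cur t m : Nat) (hm : pvHit cur t m) (hmin : ∀ r < m, ¬ pvHit cur t r) :
    ∀ fuel res, res ≤ m → m < res + fuel →
      minimizeTheDifference2_scan cur fuel res (1 <<< (t + res)) ((1 <<< t) >>> res) = m := by
  intro fuel
  induction fuel with
  | zero => intro res h1 h2; omega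
  | succ f ih =>
    intro res h1 h2
    rw [minimizeTheDifference2_scan]
    by_cases hres : pvHit cur t res
    · have : res = m := by
        rcases lt_or_eq_of_le h1 with h | h
        · exact absurd hres (hmin res h)
        · exact h
      subst this
      unfold pvHit at hres
      rw [if_pos hres]
    · unfold pvHit at hres
      rw [if_neg hres]
      have hne : res ≠ m := fun h => hres (h ▸ hm)
      have := ih (res + 1) (by omega) (by omega)
      rw [show (1 <<< (t + res)) <<< 1 = 1 <<< (t + (res + 1)) by
        rw [← Nat.shiftLeft_add]; ring_nf,
        show ((1 <<< t) >>> res) >>> 1 = (1 <<< t) >>> (res + 1) by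
        rw [← Nat.shiftRight_add]]
      exact this

-- ===== VERDICT (by name: the statement is the Claim_ definition above) =====
theorem minimizeTheDifference2_spec : Claim_equal_minimizeTheDifference2 := by
  intro mat target _ hpre
  obtain ⟨hmne, hh, ht, hrows⟩ := hpre
  unfold Spec_minimizeTheDifference2 minimizeTheDifference2 minimizeTheDifference2_alt
  set n := (mat.headD []).length with hn
  have hn0 : 0 < n := by
    rcases Nat.eq_zero_or_pos n with h | h
    · exact absurd (List.eq_nil_of_length_eq_zero (hn ▸ h)) hh
    · exact h
  have hm0 : 0 < mat.length := List.length_pos_of_ne_nil hmne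
  set cur := mat.foldl (fun cur row => minimizeTheDifference2_row cur row n) 1 with hcur
  have hinv0 : ∀ k : Nat, (1 : Nat).testBit k ↔ (k : Int) ∈ [(0 : Int)] := by
    intro k
    rw [show (1 : Nat) = 2 ^ 0 by norm_num, Nat.testBit_two_pow]
    simp [eq_comm]
  obtain ⟨hinv, hnn, hne⟩ := pv_fold_inv mat n (fun r hr => (hrows r hr)) hn0 1 [(0 : Int)]
    hinv0 (by intro s hs; simp at hs; omega) (by simp)
  -- transfer the fold characterisation to B's divide-and-conquer set
  have hmemB : ∀ x : Int, x ∈ pvSumsB mat n 0 mat.length ↔ x ∈ pvReach n [(0 : Int)] mat := by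
    intro x
    have := pv_mem_sumsB mat n mat.length 0 mat.length (by omega) hm0 le_rfl x
    simpa using this
  set t := target.toNat with htdef
  have htarget : (t : Int) = target := Int.toNat_of_nonneg ht
  set L := (pvSumsB mat n 0 mat.length).map (fun s => |s - target|) with hL
  have hLne : L ≠ [] := by
    obtain ⟨s, hs⟩ := List.exists_mem_of_ne_nil _ hne
    intro h
    have hemp : pvSumsB mat n 0 mat.length = [] := List.map_eq_nil_iff.mp (hL ▸ h)
    have hx := (hmemB s).mpr hs
    rw [hemp] at hx
    exact List.not_mem_nil hx
  -- B's value: the minimum element of L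
  obtain ⟨m, hm⟩ : ∃ m, PySem.List.min? L (fun x => x) = some m := by
    cases hq : PySem.List.min? L (fun x => x) with
    | none => exact absurd ((PySem.List.min?_eq_none_iff L _).mp hq) hLne
    | some m => exact ⟨m, rfl⟩
  have hmmem : m ∈ L := PySem.List.min?_mem hm
  have hmle : ∀ y ∈ L, m ≤ y := PySem.List.min?_isMin hm
  have hmnn : 0 ≤ m := by
    rw [hL] at hmmem
    obtain ⟨s, _, rfl⟩ := List.mem_map.mp hmmem
    positivity
  -- pvHit r ↔ (r : Int) is an element of L
  have hitiff : ∀ r : Nat, pvHit cur t r ↔ (r : Int) ∈ L := by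
    intro r
    rw [pvHit_iff, hL, List.mem_map]
    constructor
    · rintro (hb | ⟨hrt, hb⟩)
      · refine ⟨((t + r : Nat) : Int), (hmemB _).mpr ((hinv _).mp hb), ?_⟩
        rw [← htarget]; push_cast; rw [abs_of_nonneg (by omega)]; ring
      · refine ⟨((t - r : Nat) : Int), (hmemB _).mpr ((hinv _).mp hb), ?_⟩
        rw [← htarget]
        rw [show ((t - r : Nat) : Int) = (t : Int) - (r : Int) by omega]
        rw [show (t : Int) - (r : Int) - (t : Int) = -(r : Int) by ring, abs_neg,
          abs_of_nonneg (by positivity)]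
    · rintro ⟨s, hs, habs⟩
      have hs' : s ∈ pvReach n [(0 : Int)] mat := (hmemB s).mp hs
      have hsnn : 0 ≤ s := hnn _ hs'
      have hsbit : cur.testBit s.toNat := (hinv _).mpr (by rwa [Int.toNat_of_nonneg hsnn])
      by_cases hcase : target ≤ s
      · left
        have : s.toNat = t + r := by
          rw [abs_of_nonneg (by omega)] at habs
          omega
        rwa [this] at hsbit
      · right
        have habs' : (t : Int) - s = r := by
          rw [abs_of_nonpos (by omega)] at habs
          omega
        have h1 : r ≤ t := by omega
        have h2 : s.toNat = t - r := by omega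
        exact ⟨h1, by rwa [h2] at hsbit⟩
  -- A's scan returns m.toNat
  have hhit : pvHit cur t m.toNat := by
    rw [hitiff, Int.toNat_of_nonneg hmnn]; exact hmmem
  have hminr : ∀ r < m.toNat, ¬ pvHit cur t r := by
    intro r hr hcon
    have := hmle _ ((hitiff r).mp hcon)
    omega
  have hbound : m.toNat ≤ cur + t := by
    rcases (pvHit_iff cur t m.toNat).mp hhit with hb | ⟨hrt, _⟩
    · have h1 : 2 ^ (t + m.toNat) ≤ cur := Nat.ge_two_pow_of_testBit hb
      have h2 : t + m.toNat < 2 ^ (t + m.toNat) := Nat.lt_two_pow_self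
      omega
    · omega
  have hscan := pv_scan_eq cur t m.toNat hhit hminr (cur + t + 1) 0 (by omega) (by omega)
  simp only [Nat.add_zero, Nat.shiftRight_zero] at hscan
  show ((minimizeTheDifference2_scan cur (cur + t + 1) 0 (1 <<< t) (1 <<< t) : Nat) : Int) =
    (PySem.List.min? L (fun x => x)).getD 0
  rw [hscan, hm]
  simp [Int.toNat_of_nonneg hmnn]
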